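-- pv_equiv track=rewrite | github.com/Simon-Lajoie/LoLCustomBalancer | Simple_Balancer.py | count_on_roles
-- ===== SOURCE A (Python) =====
-- def count_on_roles(team):
--     roles = [player['role'] for player in team]
--
--     on_roles_count = 0
--     seen_roles = set()
--
--     for role in roles:
--         if role == "Fill":
--             on_roles_count += 1
--         elif role not in seen_roles:
--             seen_roles.add(role)
--             on_roles_count += 1
--
--     return min(on_roles_count, 5)
-- ===== SOURCE B (Python) =====
-- def count_on_roles(team):
--     # Sort the roles so equal roles are adjacent, then one scan over the
--     # sorted list: every "Fill" counts, a non-"Fill" counts only when it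
--     # differs from its predecessor (no set needed).
--     roles = sorted(player['role'] for player in team)
--     total = 0
--     prev = None
--     for role in roles:
--         if role == "Fill" or role != prev:
--             total += 1
--         prev = role
--     return min(total, 5)
-- ===== Notes on version B (the rewrite author's own statement) =====
-- stated objective: alternative
-- what changed: Replaces A's one-pass hash-set membership loop by sort-then-scan: sort the roles so duplicates are adjacent, then count every "Fill" and every non-"Fill" that differs from its predecessor; no set is maintained.
import Mathlib
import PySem

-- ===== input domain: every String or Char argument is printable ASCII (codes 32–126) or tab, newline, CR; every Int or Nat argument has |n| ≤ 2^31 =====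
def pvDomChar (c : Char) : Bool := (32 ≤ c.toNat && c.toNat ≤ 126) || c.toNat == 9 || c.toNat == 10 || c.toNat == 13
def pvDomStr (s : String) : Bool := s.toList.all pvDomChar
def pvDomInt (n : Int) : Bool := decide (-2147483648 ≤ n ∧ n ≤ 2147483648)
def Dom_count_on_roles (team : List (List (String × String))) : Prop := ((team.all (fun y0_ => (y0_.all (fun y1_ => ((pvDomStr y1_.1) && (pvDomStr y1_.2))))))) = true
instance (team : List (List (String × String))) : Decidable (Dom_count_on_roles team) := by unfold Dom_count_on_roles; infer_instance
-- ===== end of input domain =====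

-- B replaces A's one-pass hash-set loop by sort-then-scan: sort the roles so equal
-- roles are adjacent, then count every "Fill" and every non-"Fill" differing from
-- its predecessor (objective: alternative; O(n log n) vs O(n)).

-- ===== PORT A =====
-- roles = [player['role'] for player in team]  (KeyError → none; excluded by Pre_)
def pvRolesA (team : List (List (String × String))) : Option (List String) :=
  team.mapM (fun p => p.lookup "role")

-- the for-loop over roles with accumulator on_roles_count and set seen_roles
def pvLoopA : List String → Int → PySem.Set String → Int
  | [], c, _ => c
  | r :: rs, c, seen =>
    if r = "Fill" then pvLoopA rs (c + 1) seen
    else if PySem.Set.contains seen r then pvLoopA rs c seen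
    else pvLoopA rs (c + 1) (PySem.Set.add seen r)

def count_on_roles (team : List (List (String × String))) : Int :=
  match pvRolesA team with
  | some roles => min (pvLoopA roles 0 PySem.Set.empty) 5
  | none => 0   -- unreachable under Pre_ (KeyError in Python)

-- ===== PORT B =====
-- the for-loop over the sorted roles with accumulators total and prev (None ↦ none)
def pvScanB : List String → Int → Option String → Int
  | [], total, _ => total
  | r :: rs, total, prev =>
    pvScanB rs (if r = "Fill" ∨ ¬ (some r = prev) then total + 1 else total) (some r)

def count_on_roles_alt (team : List (List (String × String))) : Int :=
  match team.mapM (fun p => p.lookup "role") with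
  | some roles =>
    min (pvScanB (PySem.List.sorted roles (fun x => x) false) 0 none) 5
  | none => 0   -- unreachable under Pre_ (KeyError in Python)

-- ===== PRECONDITION & SPEC =====
-- Pre_ : every player dict has a 'role' key (otherwise Python raises KeyError)
def Pre_count_on_roles (team : List (List (String × String))) : Prop :=
  (team.all (fun p => (p.lookup "role").isSome)) = true
instance (team : List (List (String × String))) : Decidable (Pre_count_on_roles team) := by
  unfold Pre_count_on_roles; infer_instance

def pvWitness_count_on_roles : (List (List (String × String))) :=
  [[("role", "Top")], [("role", "Fill")], [("role", "Top")]]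

def Spec_count_on_roles (team : List (List (String × String))) (out : Int) : Prop := out = count_on_roles_alt team
instance (team : List (List (String × String))) (out : Int) : Decidable (Spec_count_on_roles team out) := by unfold Spec_count_on_roles; infer_instance

-- ===== CLAIM (what is proved, stated in full; the proofs are below) =====
def Claim_equal_count_on_roles : Prop := ∀ (team : List (List (String × String))), Dom_count_on_roles team → Pre_count_on_roles team → Spec_count_on_roles team (count_on_roles team)

-- ===== LEMMAS AND PROOFS =====

-- A's loop computes: start + (# of "Fill" occurrences) + (# of distinct non-"Fill" roles not already seen)
theorem pvLoopA_eq (rs : List String) : ∀ (c : Int) (seen : PySem.Set String),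
    pvLoopA rs c seen
      = c + (rs.count "Fill" : Int) + ((rs.toFinset \ insert "Fill" seen.toFinset).card : Int) := by
  induction rs with
  | nil => intro c seen; simp [pvLoopA]
  | cons r rs ih =>
    intro c seen
    by_cases hf : r = "Fill"
    · subst hf
      rw [pvLoopA, if_pos rfl, ih]
      have : ("Fill" :: rs).toFinset \ insert "Fill" seen.toFinset
           = rs.toFinset \ insert "Fill" seen.toFinset := by
        ext x
        simp only [List.toFinset_cons, Finset.mem_sdiff, Finset.mem_insert, List.mem_toFinset]
        tauto
      rw [this, List.count_cons]
      push_cast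
      split_ifs with hT
      · omega
      · exact absurd rfl hT
    · by_cases hm : r ∈ seen
      · rw [pvLoopA, if_neg hf, if_pos (by simpa [PySem.Set.contains_iff] using hm), ih]
        have : (r :: rs).toFinset \ insert "Fill" seen.toFinset
             = rs.toFinset \ insert "Fill" seen.toFinset := by
          ext x
          simp only [List.toFinset_cons, Finset.mem_sdiff, Finset.mem_insert, List.mem_toFinset]
          constructor
          · rintro ⟨hx | hx, hns⟩
            · subst hx; exact absurd (Or.inr hm) hns
            · exact ⟨hx, hns⟩
          · rintro ⟨hx, hns⟩; exact ⟨Or.inr hx, hns⟩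
        rw [this, List.count_cons, if_neg (by simpa using hf)]
        simp
      · rw [pvLoopA, if_neg hf,
            if_neg (by simp [hm]), ih]
        have hadd : (PySem.Set.add seen r).toFinset = insert r seen.toFinset := by
          rw [PySem.Set.add_of_not_mem hm]
          ext x; simp
        rw [hadd]
        have hset : (r :: rs).toFinset \ insert "Fill" seen.toFinset
             = insert r (rs.toFinset \ insert "Fill" (insert r seen.toFinset)) := by
          ext x
          simp only [List.toFinset_cons, Finset.mem_sdiff, Finset.mem_insert, List.mem_toFinset]
          constructor
          · rintro ⟨hx | hx, hns⟩
            · exact Or.inl hx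
            · by_cases hxr : x = r
              · exact Or.inl hxr
              · exact Or.inr ⟨hx, by push Not at hns ⊢; exact ⟨hns.1, hxr, hns.2⟩⟩
          · rintro (hx | ⟨hx, hns⟩)
            · subst hx; exact ⟨Or.inl rfl, by push Not; exact ⟨hf, hm⟩⟩
            · push Not at hns; exact ⟨Or.inr hx, by push Not; exact ⟨hns.1, hns.2.2⟩⟩
        have hr : r ∉ rs.toFinset \ insert "Fill" (insert r seen.toFinset) := by simp
        rw [hset, Finset.card_insert_of_notMem hr, List.count_cons,
            if_neg (by simpa using hf)]
        push_cast
        ring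

-- the Finset a previous element prev excludes
def pvPrevSet : Option String → Finset String
  | none => ∅
  | some q => {q}

-- B's scan on a sorted list counts the "Fill"s plus the non-"Fill" roles distinct
-- from each other and from prev
theorem pvScanB_eq (rs : List String) : ∀ (total : Int) (prev : Option String),
    rs.Pairwise (· ≤ ·) →
    (∀ q, prev = some q → ∀ x ∈ rs, q ≤ x) →
    pvScanB rs total prev
      = total + (rs.count "Fill" : Int)
        + ((rs.toFinset \ (insert "Fill" (pvPrevSet prev))).card : Int) := by
  induction rs with
  | nil => intro total prev _ _; simp [pvScanB]
  | cons r rs ih =>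
    intro total prev hsorted hprev
    have hr : ∀ x ∈ rs, r ≤ x := by
      intro x hx; exact (List.pairwise_cons.mp hsorted).1 x hx
    have hrs : rs.Pairwise (· ≤ ·) := (List.pairwise_cons.mp hsorted).2
    -- key: a previous element reappearing in rs must equal r
    have hq_mem : ∀ q, prev = some q → ∀ x ∈ rs, x = q → q = r := by
      intro q hpq x hx hxq
      have h1 : q ≤ r := hprev q hpq r (List.mem_cons_self)
      have h2 : r ≤ q := hxq ▸ hr x hx
      exact le_antisymm h1 h2
    -- x ∈ pvPrevSet prev and x ∈ rs forces x = r
    have hP_mem : ∀ x ∈ rs, x ∈ pvPrevSet prev → x = r := by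
      intro x hx hP
      cases hq : prev with
      | none => rw [hq] at hP; simp [pvPrevSet] at hP
      | some q =>
        rw [hq] at hP
        have hxq : x = q := by simpa [pvPrevSet] using hP
        exact hxq.trans (hq_mem q hq x hx hxq)
    rw [pvScanB, ih _ (some r) hrs (by intro q hq x hx; cases hq; exact hr x hx)]
    by_cases hf : r = "Fill"
    · subst hf
      rw [if_pos (Or.inl rfl)]
      have hset : rs.toFinset \ insert "Fill" (pvPrevSet (some "Fill"))
           = ("Fill" :: rs).toFinset \ insert "Fill" (pvPrevSet prev) := by
        ext x
        simp only [pvPrevSet, List.toFinset_cons, Finset.mem_sdiff, Finset.mem_insert,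
          List.mem_toFinset, Finset.mem_singleton]
        constructor
        · rintro ⟨hx, hns⟩
          have hxF : x ≠ "Fill" := fun h => hns (Or.inl h)
          refine ⟨Or.inr hx, ?_⟩
          rintro (hF | hP)
          · exact hxF hF
          · exact hxF (hP_mem x hx hP)
        · rintro ⟨hx | hx, hns⟩
          · exact absurd (Or.inl hx) hns
          · exact ⟨hx, by rintro (h | h) <;> exact hns (Or.inl h)⟩
      rw [hset, List.count_cons, if_pos (by decide : (("Fill":String) == "Fill") = true)]
      push_cast; ring
    · by_cases hp : prev = some r
      · rw [if_neg (by simp [hf, hp])]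
        have hset : rs.toFinset \ insert "Fill" (pvPrevSet (some r))
             = (r :: rs).toFinset \ insert "Fill" (pvPrevSet prev) := by
          rw [hp]
          ext x
          simp only [pvPrevSet, List.toFinset_cons, Finset.mem_sdiff, Finset.mem_insert,
            List.mem_toFinset, Finset.mem_singleton]
          tauto
        rw [hset, List.count_cons, if_neg (by simpa using hf)]
        simp
      · rw [if_pos (Or.inr (by simpa using fun h => hp h.symm))]
        have hset : (r :: rs).toFinset \ insert "Fill" (pvPrevSet prev)
             = insert r (rs.toFinset \ insert "Fill" (pvPrevSet (some r))) := by
          ext x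
          simp only [pvPrevSet, List.toFinset_cons, Finset.mem_sdiff, Finset.mem_insert,
            List.mem_toFinset, Finset.mem_singleton]
          constructor
          · rintro ⟨hx | hx, hns⟩
            · exact Or.inl hx
            · by_cases hxr : x = r
              · exact Or.inl hxr
              · refine Or.inr ⟨hx, ?_⟩
                rintro (h | h)
                · exact hns (Or.inl h)
                · exact hxr h
          · rintro (hx | ⟨hx, hns⟩)
            · subst hx
              refine ⟨Or.inl rfl, ?_⟩
              rintro (hF | hP)
              · exact hf hF
              · cases hq : prev with
                | none => rw [hq] at hP; simp [pvPrevSet] at hP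
                | some q =>
                  rw [hq] at hP
                  have hxq : x = q := by simpa using hP
                  exact hp (by rw [hq, hxq])
            · refine ⟨Or.inr hx, ?_⟩
              rintro (hF | hP)
              · exact hns (Or.inl hF)
              · exact hns (Or.inr (hP_mem x hx hP))
        have hrn : r ∉ rs.toFinset \ insert "Fill" (pvPrevSet (some r)) := by
          simp [pvPrevSet]
        rw [hset, Finset.card_insert_of_notMem hrn, List.count_cons,
            if_neg (by simpa using hf)]
        push_cast; ring

-- ===== VERDICT (by name: the statement is the Claim_ definition above) =====
theorem count_on_roles_spec : Claim_equal_count_on_roles := by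
  intro team _ _
  unfold Spec_count_on_roles count_on_roles count_on_roles_alt pvRolesA
  cases h : team.mapM (fun p => p.lookup "role") with
  | none => rfl
  | some roles =>
    simp only []
    have hperm : (PySem.List.sorted roles (fun x => x) false).Perm roles :=
      PySem.List.sorted_perm roles (fun x => x) false
    have htf : (PySem.List.sorted roles (fun x => x) false).toFinset = roles.toFinset := by
      ext x; simp [List.mem_toFinset, hperm.mem_iff]
    rw [pvLoopA_eq,
        pvScanB_eq _ _ _ (by simpa using PySem.List.sorted_pairwise (xs := roles) (key := fun x => x))
          (by intro q hq; cases hq)]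
    rw [hperm.count_eq, htf]
    simp [pvPrevSet, PySem.Set.empty]
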